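-- pv_equiv track=rewrite | github.com/shubh2565/Bioinformatics-Algorithms | Gotoh/gotoh.py | init_matrix_d
-- ===== SOURCE A (Python) =====
-- def init_matrix_d(seq_1, seq_2, cost_gap_open, cost_gap_extend):
--     """
--     Implement initialization of the matrix D
--     """
--     matrix_d = []
--
--     while len(matrix_d) < len(seq_1)+1:
--         matrix_d.append([])
--         while len(matrix_d[-1]) < len(seq_2)+1:
--             matrix_d[-1].append(0)
--
--     for i in range(1, len(matrix_d[0])):
--         matrix_d[0][i] = cost_gap_open + cost_gap_extend*(i)
--     for j in range(1, len(matrix_d)):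
--         matrix_d[j][0] = cost_gap_open + cost_gap_extend*(j)
--
--     return matrix_d
-- ===== SOURCE B (Python) =====
-- def init_matrix_d(seq_1, seq_2, cost_gap_open, cost_gap_extend):
--     """
--     Compute every cell from a single closed-form coordinate formula and build
--     the matrix by recursion on the row index, instead of allocating an
--     all-zero matrix and then patching its first row and first column.
--     cell(i, j): interior and corner cells are 0; an edge cell (exactly one of
--     i, j is zero) costs cost_gap_open + cost_gap_extend*(i+j), since i+j is
--     then the nonzero index.
--     """
--     def cell(i, j):
--         if i and j:
--             return 0
--         if i == j:
--             return 0
--         return cost_gap_open + cost_gap_extend * (i + j)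
--
--     def build(i):
--         if i > len(seq_1):
--             return []
--         return [[cell(i, j) for j in range(len(seq_2) + 1)]] + build(i + 1)
--
--     return build(0)
-- ===== Notes on version B (the rewrite author's own statement) =====
-- stated objective: alternative
-- what changed: Replaces allocate-all-zeros-then-patch-edges with a pure closed-form cell formula (edge cells cost open+extend*(i+j), everything else 0) and a recursive row builder, so no matrix is ever mutated.
import Mathlib
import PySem

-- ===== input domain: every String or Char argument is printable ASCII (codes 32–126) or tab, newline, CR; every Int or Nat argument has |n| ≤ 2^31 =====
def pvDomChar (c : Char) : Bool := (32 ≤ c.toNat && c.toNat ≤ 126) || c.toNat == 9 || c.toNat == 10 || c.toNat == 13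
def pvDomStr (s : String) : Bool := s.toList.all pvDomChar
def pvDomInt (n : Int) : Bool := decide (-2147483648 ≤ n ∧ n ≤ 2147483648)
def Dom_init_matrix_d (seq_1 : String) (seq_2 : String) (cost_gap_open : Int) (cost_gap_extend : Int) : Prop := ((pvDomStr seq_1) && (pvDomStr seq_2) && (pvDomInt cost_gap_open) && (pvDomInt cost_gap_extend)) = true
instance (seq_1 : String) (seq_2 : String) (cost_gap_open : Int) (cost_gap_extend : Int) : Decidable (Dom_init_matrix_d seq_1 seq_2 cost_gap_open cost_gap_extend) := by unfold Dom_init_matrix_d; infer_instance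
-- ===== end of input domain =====

-- B computes each cell of the Gotoh D matrix from a closed-form coordinate formula and builds
-- the rows by recursion; A zero-fills with nested while loops and then overwrites the edges.


-- ===== PORT A =====
-- inner while: append 0 to the last row until its length is len(seq_2)+1
def pvA_fillRow (t : Nat) (row : List Int) : List Int :=
  if row.length < t then pvA_fillRow t (row ++ [0]) else row
termination_by t - row.length
decreasing_by simp; omega

-- outer while: append a fresh row (built by the inner while on []) until len(matrix_d) = len(seq_1)+1
def pvA_addRows (t t2 : Nat) (m : List (List Int)) : List (List Int) :=
  if m.length < t then pvA_addRows t t2 (m ++ [pvA_fillRow t2 []]) else m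
termination_by t - m.length
decreasing_by simp; omega

def init_matrix_d (seq_1 : String) (seq_2 : String) (cost_gap_open : Int) (cost_gap_extend : Int) : List (List Int) :=
  let m0 := pvA_addRows (seq_1.toList.length + 1) (seq_2.toList.length + 1) []
  -- for i in range(1, len(matrix_d[0])): matrix_d[0][i] = cost_gap_open + cost_gap_extend*i
  let m1 := (PySem.List.pyRange 1 (((m0.headD []).length : Nat) : Int)).foldl
      (fun m i => m.set 0 ((m.headD []).set i.toNat (cost_gap_open + cost_gap_extend * i))) m0
  -- for j in range(1, len(matrix_d)): matrix_d[j][0] = cost_gap_open + cost_gap_extend*j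
  (PySem.List.pyRange 1 ((m1.length : Nat) : Int)).foldl
      (fun m j => m.set j.toNat ((m.getD j.toNat []).set 0 (cost_gap_open + cost_gap_extend * j))) m1

-- ===== PORT B =====
-- cell(i, j): 0 for interior and corner cells, cost_gap_open + cost_gap_extend*(i+j) on an edge
def pvB_cell (o e : Int) (i j : Nat) : Int :=
  if i ≠ 0 ∧ j ≠ 0 then 0
  else if i = j then 0
  else o + e * ((i : Int) + (j : Int))

-- build(i): the rows from index i up to len(seq_1), each a map of cell over the column indices
def pvB_build (n1 n2 : Nat) (o e : Int) (i : Nat) : List (List Int) :=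
  if i > n1 then []
  else ((List.range (n2 + 1)).map (pvB_cell o e i)) :: pvB_build n1 n2 o e (i + 1)
termination_by n1 + 1 - i

def init_matrix_d_alt (seq_1 : String) (seq_2 : String) (cost_gap_open : Int) (cost_gap_extend : Int) : List (List Int) :=
  pvB_build seq_1.toList.length seq_2.toList.length cost_gap_open cost_gap_extend 0

-- ===== PRECONDITION & SPEC =====
def Spec_init_matrix_d (seq_1 : String) (seq_2 : String) (cost_gap_open : Int) (cost_gap_extend : Int) (out : List (List Int)) : Prop := out = init_matrix_d_alt seq_1 seq_2 cost_gap_open cost_gap_extend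
instance (seq_1 : String) (seq_2 : String) (cost_gap_open : Int) (cost_gap_extend : Int) (out : List (List Int)) : Decidable (Spec_init_matrix_d seq_1 seq_2 cost_gap_open cost_gap_extend out) := by unfold Spec_init_matrix_d; infer_instance

-- ===== CLAIM (what is proved, stated in full; the proofs are below) =====
def Claim_equal_init_matrix_d : Prop := ∀ (seq_1 : String) (seq_2 : String) (cost_gap_open : Int) (cost_gap_extend : Int), Dom_init_matrix_d seq_1 seq_2 cost_gap_open cost_gap_extend → Spec_init_matrix_d seq_1 seq_2 cost_gap_open cost_gap_extend (init_matrix_d seq_1 seq_2 cost_gap_open cost_gap_extend)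

-- ===== LEMMAS AND PROOFS =====

theorem pvA_fillRow_eq (t : Nat) (row : List Int) :
    pvA_fillRow t row = row ++ List.replicate (t - row.length) 0 := by
  fun_induction pvA_fillRow t row with
  | case1 row h ih =>
      rw [ih]
      have : t - row.length = (t - (row ++ [0]).length) + 1 := by simp; omega
      rw [this, List.replicate_succ, List.append_assoc]
      rfl
  | case2 row h =>
      have : t - row.length = 0 := by omega
      simp [this]

theorem pvA_addRows_eq (t t2 : Nat) (m : List (List Int)) :
    pvA_addRows t t2 m = m ++ List.replicate (t - m.length) (List.replicate t2 0) := by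
  fun_induction pvA_addRows t t2 m with
  | case1 m h ih =>
      rw [ih, pvA_fillRow_eq]
      have : t - m.length = (t - (m ++ [pvA_fillRow t2 []]).length) + 1 := by simp; omega
      rw [this, List.replicate_succ, List.append_assoc]
      simp [pvA_fillRow_eq]
  | case2 m h =>
      have : t - m.length = 0 := by omega
      simp [this]

theorem pyRange_one_len (k : Nat) :
    (PySem.List.pyRange 1 ((k : Int) + 1)).length = k := by
  induction k with
  | zero => decide
  | succ k ih =>
      have h : (((k + 1 : Nat)) : Int) + 1 = ((k : Int) + 1) + 1 := by push_cast; ring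
      rw [h, PySem.List.pyRange_one_succ_right (by omega)]
      simp [ih]

-- loop 1 only rewrites row 0
theorem foldl_set0 (f : Int → Int) (l : List Int) (r : List Int) (rest : List (List Int)) :
    l.foldl (fun m i => m.set 0 ((m.headD []).set i.toNat (f i))) (r :: rest)
      = (l.foldl (fun r i => r.set i.toNat (f i)) r) :: rest := by
  induction l generalizing r with
  | nil => rfl
  | cons a l ih =>
      simp only [List.foldl, List.headD_cons, List.set_cons_zero]
      exact ih _

-- filling indices 1..k of an all-zero row of length k+m+1
theorem rowfill (f : Int → Int) (k m : Nat) :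
    (PySem.List.pyRange 1 ((k : Int) + 1)).foldl (fun r i => r.set i.toNat (f i))
        (List.replicate (k + m + 1) 0)
      = 0 :: ((PySem.List.pyRange 1 ((k : Int) + 1)).map f ++ List.replicate m 0) := by
  induction k generalizing m with
  | zero => simp [List.replicate_succ]
  | succ k ih =>
      have h : (((k + 1 : Nat)) : Int) + 1 = ((k : Int) + 1) + 1 := by push_cast; ring
      rw [h, PySem.List.pyRange_one_succ_right (by omega), List.foldl_append, List.map_append]
      have harr : k + 1 + m + 1 = k + (m + 1) + 1 := by omega
      rw [harr, ih (m + 1)]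
      simp only [List.foldl]
      have hk1 : ((k : Int) + 1).toNat = k + 1 := by omega
      rw [List.replicate_succ, hk1, List.set_cons_succ, List.set_append]
      simp

-- loop 2 rewrites the head of rows 1..k, leaving row 0 alone
theorem colfill (g : Int → Int) (top zr : List Int) (k m : Nat) :
    (PySem.List.pyRange 1 ((k : Int) + 1)).foldl
        (fun mt j => mt.set j.toNat ((mt.getD j.toNat []).set 0 (g j)))
        (top :: List.replicate (k + m) zr)
      = top :: ((PySem.List.pyRange 1 ((k : Int) + 1)).map (fun j => zr.set 0 (g j))
          ++ List.replicate m zr) := by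
  induction k generalizing m with
  | zero => simp
  | succ k ih =>
      have h : (((k + 1 : Nat)) : Int) + 1 = ((k : Int) + 1) + 1 := by push_cast; ring
      rw [h, PySem.List.pyRange_one_succ_right (by omega), List.foldl_append, List.map_append]
      have harr : k + 1 + m = k + (m + 1) := by omega
      rw [harr, ih (m + 1)]
      simp only [List.foldl]
      have hk1 : ((k : Int) + 1).toNat = k + 1 := by omega
      rw [List.replicate_succ, hk1]
      simp only [List.getD_cons_succ, List.set_cons_succ]
      have hlen : (List.map (fun j => zr.set 0 (g j)) (PySem.List.pyRange 1 ((k : Int) + 1))).length = k := by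
        rw [List.length_map]; exact pyRange_one_len k
      have hg : (List.map (fun j => zr.set 0 (g j)) (PySem.List.pyRange 1 ((k : Int) + 1))
            ++ zr :: List.replicate m zr).getD k [] = zr := by
        simp [List.getD_eq_getElem?_getD, hlen]
      rw [hg, List.set_append]
      simp [hlen]

-- B's row 0 is A's filled top row
theorem pvB_row0 (o e : Int) (n2 : Nat) :
    (List.range (n2 + 1)).map (pvB_cell o e 0)
      = 0 :: (PySem.List.pyRange 1 ((n2 : Int) + 1)).map (fun i => o + e * i) := by
  rw [PySem.List.pyRange_one, List.range_succ_eq_map]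
  have hn : ((n2 : Int) + 1 - 1).toNat = n2 := by omega
  simp only [List.map_cons, List.map_map, hn]
  rw [show pvB_cell o e 0 0 = 0 from by simp [pvB_cell]]
  congr 1
  apply List.map_congr_left
  intro k _
  simp only [Function.comp_apply]
  show pvB_cell o e 0 (k + 1) = o + e * (1 + (k : Int))
  rw [pvB_cell, if_neg (by simp), if_neg (by omega)]
  push_cast
  ring

-- B's row i (i ≥ 1) is A's gap row
theorem pvB_rowpos (o e : Int) (n2 i : Nat) (hi : i ≠ 0) :
    (List.range (n2 + 1)).map (pvB_cell o e i)
      = (o + e * (i : Int)) :: List.replicate n2 0 := by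
  rw [List.range_succ_eq_map]
  simp only [List.map_cons, List.map_map]
  rw [show pvB_cell o e i 0 = o + e * (i : Int) from by simp [pvB_cell, hi]]
  congr 1
  have : ∀ k ∈ List.range n2, (pvB_cell o e i ∘ Nat.succ) k = 0 := by
    intro k _; simp [pvB_cell, hi]
  rw [List.map_congr_left this]
  simp [List.map_const']

-- unrolling the recursive builder: build i yields the rows i .. n1
theorem pvB_build_eq (n1 n2 : Nat) (o e : Int) (i : Nat) :
    pvB_build n1 n2 o e i
      = (List.range (n1 + 1 - i)).map (fun k => (List.range (n2 + 1)).map (pvB_cell o e (i + k))) := by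
  fun_induction pvB_build n1 n2 o e i with
  | case1 i h =>
      have : n1 + 1 - i = 0 := by omega
      simp [this]
  | case2 i h ih =>
      rw [ih]
      have h1 : n1 + 1 - i = (n1 - i) + 1 := by omega
      have h2 : n1 + 1 - (i + 1) = n1 - i := by omega
      rw [h1, h2, List.range_succ_eq_map (n := n1 - i)]
      simp only [List.map_cons, List.map_map]
      congr 1
      apply List.map_congr_left
      intro k _
      simp only [Function.comp_apply]
      have : i + (k + 1) = i + 1 + k := by omega
      rw [this]

-- ===== VERDICT (by name: the statement is the Claim_ definition above) =====
theorem init_matrix_d_spec : Claim_equal_init_matrix_d := by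
  intro seq_1 seq_2 go ge _
  unfold Spec_init_matrix_d init_matrix_d
  set n1 := seq_1.toList.length with hn1
  set n2 := seq_2.toList.length with hn2
  have hm0 : pvA_addRows (n1 + 1) (n2 + 1) [] =
      List.replicate (n2 + 1) (0 : Int) :: List.replicate n1 (List.replicate (n2 + 1) 0) := by
    rw [pvA_addRows_eq]
    simp [List.replicate_succ]
  rw [hm0]
  simp only [List.headD_cons, List.length_replicate]
  have hcast : (((n2 + 1 : Nat)) : Int) = (n2 : Int) + 1 := by push_cast; ring
  rw [hcast, foldl_set0]
  have hz : List.replicate (n2 + 1) (0 : Int) = List.replicate (n2 + 0 + 1) 0 := by simp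
  rw [hz, rowfill (fun i => go + ge * i) n2 0]
  simp only [List.length_cons, List.length_replicate]
  have hcast1 : (((n1 + 1 : Nat)) : Int) = (n1 : Int) + 1 := by push_cast; ring
  have hrep : List.replicate n1 (List.replicate (n2 + 1) (0 : Int)) = List.replicate (n1 + 0) (List.replicate (n2 + 1) 0) := by simp
  rw [hcast1, hrep, colfill (fun j => go + ge * j) _ _ n1 0]
  -- now rewrite B into the same normal form
  have hB : init_matrix_d_alt seq_1 seq_2 go ge
      = ((List.range (n2 + 1)).map (pvB_cell go ge 0)) ::
        (List.range n1).map (fun k => (List.range (n2 + 1)).map (pvB_cell go ge (k + 1))) := by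
    unfold init_matrix_d_alt
    rw [pvB_build_eq]
    have : n1 + 1 - 0 = n1 + 1 := by omega
    rw [this, List.range_succ_eq_map (n := n1)]
    simp only [List.map_cons, List.map_map]
    congr 1
    apply List.map_congr_left
    intro k _
    simp only [Function.comp_apply]
    have : (0 : Nat) + (k + 1) = k + 1 := by omega
    rw [this]
  rw [hB, pvB_row0]
  simp only [List.append_nil, List.replicate]
  congr 1
  rw [PySem.List.pyRange_one]
  have hn : ((n1 : Int) + 1 - 1).toNat = n1 := by omega
  rw [hn, List.map_map]
  apply List.map_congr_left
  intro k _
  simp only [Function.comp_apply]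
  rw [pvB_rowpos go ge n2 (k + 1) (by omega), List.set_cons_zero]
  congr 1
  push_cast
  ring
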